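-- pv_equiv track=rewrite | github.com/czfsss/word-tool | tools/word-chunk.py | limit_chunks_to_max
-- ===== SOURCE A (Python) =====
-- def limit_chunks_to_max(chunks, max_chunks=30):
--     """
--     限制分段个数不超过指定数量，如果超过则按数学方法合并相邻段落。
--
--     合并策略：
--     1. 计算 商 = 段落总数 // max_chunks，余数 = 段落总数 % max_chunks
--     2. 如果余数为0，每「商」个段落合并成1个
--     3. 如果余数不为0，前「余数」组每「商+1」个段落合并成1个，剩余的每「商」个段落合并成1个
--
--     参数:
--         chunks: 原始分段列表
--         max_chunks: 最大分段个数，默认30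
--     返回:
--         合并后的分段列表（最多 max_chunks 个）
--     """
--     if len(chunks) <= max_chunks:
--         return chunks
--
--     total_chunks = len(chunks)
--     quotient = total_chunks // max_chunks  # 商
--     remainder = total_chunks % max_chunks  # 余数
--
--     result_chunks = []
--     chunk_index = 0
--
--     # 判断是否能整除
--     if total_chunks % max_chunks == 0:
--         # 能整除：每 quotient 个段落合并成1个
--         for i in range(max_chunks):
--             merged_chunk_parts = []
--             for j in range(quotient):
--                 if chunk_index < total_chunks:
--                     merged_chunk_parts.append(chunks[chunk_index])
--                     chunk_index += 1
--
--             if merged_chunk_parts: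
--                 result_chunks.append("\n".join(merged_chunk_parts))
--     else:
--         # 不能整除：前 remainder 组每组 quotient+1 个段落，剩余的每组 quotient 个段落
--
--         # 处理前 remainder 组，每组 quotient+1 个段落
--         for i in range(remainder):
--             # 合并 quotient+1 个段落
--             merged_chunk_parts = []
--             for j in range(quotient + 1):
--                 if chunk_index < total_chunks:
--                     merged_chunk_parts.append(chunks[chunk_index])
--                     chunk_index += 1
--
--             if merged_chunk_parts:
--                 result_chunks.append("\n".join(merged_chunk_parts))
--
--         # 处理剩余的组，每组 quotient 个段落
--         remaining_groups = max_chunks - remainder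
--         for i in range(remaining_groups):
--             # 合并 quotient 个段落
--             merged_chunk_parts = []
--             for j in range(quotient):
--                 if chunk_index < total_chunks:
--                     merged_chunk_parts.append(chunks[chunk_index])
--                     chunk_index += 1
--
--             if merged_chunk_parts:
--                 result_chunks.append("\n".join(merged_chunk_parts))
--
--     return result_chunks
-- ===== SOURCE B (Python) =====
-- def limit_chunks_to_max(chunks, max_chunks=30):
--     if len(chunks) <= max_chunks:
--         return chunks
--     total = len(chunks)
--     quotient, remainder = divmod(total, max_chunks)
--     result = []
--     for i in range(max_chunks):
--         start = i * quotient + min(i, remainder)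
--         end = start + quotient + (1 if i < remainder else 0)
--         result.append("\n".join(chunks[start:end]))
--     return result
-- ===== Notes on version B (the rewrite author's own statement) =====
-- stated objective: simpler
-- what changed: Replaces A's divisibility branch, three sequential group loops and running chunk_index counter by one uniform loop whose slice boundaries start = i*quotient + min(i, remainder) are computed by a closed formula.
import Mathlib
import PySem

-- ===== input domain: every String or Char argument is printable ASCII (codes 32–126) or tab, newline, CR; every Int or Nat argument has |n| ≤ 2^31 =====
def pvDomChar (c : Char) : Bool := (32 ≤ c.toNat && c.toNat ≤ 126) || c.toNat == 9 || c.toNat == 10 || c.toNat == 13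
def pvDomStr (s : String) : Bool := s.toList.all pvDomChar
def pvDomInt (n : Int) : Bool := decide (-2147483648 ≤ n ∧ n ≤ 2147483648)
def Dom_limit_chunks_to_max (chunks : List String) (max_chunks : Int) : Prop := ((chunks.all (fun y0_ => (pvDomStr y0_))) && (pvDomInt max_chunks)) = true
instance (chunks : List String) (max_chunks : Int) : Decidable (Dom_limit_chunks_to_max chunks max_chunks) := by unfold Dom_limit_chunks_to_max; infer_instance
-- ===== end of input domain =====

-- B replaces A's divisibility branch, three group loops and running chunk_index counter by one
-- uniform loop over formula-computed slice boundaries; same return value (objective: simpler).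

-- ===== PORT A =====
-- inner 'for j in range(cnt): if chunk_index < total: append chunks[chunk_index]; chunk_index += 1'
-- (the guard makes the index always in range, so pyGetD's default is never used)
def pvStep (chunks : List String) (total : Int) : (List String × Int) → Int → (List String × Int) :=
  fun p _ => if p.2 < total then (p.1 ++ [PySem.List.pyGetD chunks p.2 ""], p.2 + 1) else p

-- one group of A's merging: inner loop from chunk_index, then 'if merged_chunk_parts: append join'
def pvGroup (chunks : List String) (total cnt : Int) (st : List String × Int) : List String × Int :=
  let inner := (PySem.List.pyRange 0 cnt 1).foldl (pvStep chunks total) ([], st.2)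
  (if inner.1 = [] then st.1 else st.1 ++ [PySem.Str.join "\n" inner.1], inner.2)

def limit_chunks_to_max (chunks : List String) (max_chunks : Int) : List String :=
  if (chunks.length : Int) ≤ max_chunks then chunks
  else
    let total : Int := chunks.length
    let quotient := PySem.Int.floordiv total max_chunks
    let remainder := PySem.Int.mod total max_chunks
    if remainder = 0 then
      ((PySem.List.pyRange 0 max_chunks 1).foldl
        (fun st _ => pvGroup chunks total quotient st) ([], 0)).1
    else
      let st1 := (PySem.List.pyRange 0 remainder 1).foldl
        (fun st _ => pvGroup chunks total (quotient + 1) st) ([], 0)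
      let st2 := (PySem.List.pyRange 0 (max_chunks - remainder) 1).foldl
        (fun st _ => pvGroup chunks total quotient st) st1
      st2.1

-- ===== PORT B =====
def limit_chunks_to_max_alt (chunks : List String) (max_chunks : Int) : List String :=
  if (chunks.length : Int) ≤ max_chunks then chunks
  else
    let total : Int := chunks.length
    let quotient := PySem.Int.floordiv total max_chunks
    let remainder := PySem.Int.mod total max_chunks
    (PySem.List.pyRange 0 max_chunks 1).foldl
      (fun acc i =>
        let start := i * quotient + min i remainder
        let stop := start + quotient + (if i < remainder then 1 else 0)
        acc ++ [PySem.Str.join "\n" (PySem.List.slice chunks (some start) (some stop))])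
      []

-- ===== PRECONDITION & SPEC =====
-- Pre_ excludes only non-empty chunks with max_chunks = 0 (A raises ZeroDivisionError there; B does too).
def Pre_limit_chunks_to_max (chunks : List String) (max_chunks : Int) : Prop :=
  chunks = [] ∨ max_chunks ≠ 0
instance (chunks : List String) (max_chunks : Int) : Decidable (Pre_limit_chunks_to_max chunks max_chunks) := by unfold Pre_limit_chunks_to_max; infer_instance

def pvWitness_limit_chunks_to_max : List String × Int := (["a", "b", "c"], 2)

def Spec_limit_chunks_to_max (chunks : List String) (max_chunks : Int) (out : List String) : Prop := out = limit_chunks_to_max_alt chunks max_chunks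
instance (chunks : List String) (max_chunks : Int) (out : List String) : Decidable (Spec_limit_chunks_to_max chunks max_chunks out) := by unfold Spec_limit_chunks_to_max; infer_instance

-- ===== CLAIM (what is proved, stated in full; the proofs are below) =====
def Claim_equal_limit_chunks_to_max : Prop := ∀ (chunks : List String) (max_chunks : Int), Dom_limit_chunks_to_max chunks max_chunks → Pre_limit_chunks_to_max chunks max_chunks → Spec_limit_chunks_to_max chunks max_chunks (limit_chunks_to_max chunks max_chunks)

-- ===== LEMMAS AND PROOFS =====

-- A's inner loop, started in range, collects exactly the next c chunks.
lemma pv_inner_eq (chunks : List String) (c idx : Nat) (parts : List String)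
    (h : idx + c ≤ chunks.length) :
    (PySem.List.pyRange 0 (c : Int) 1).foldl (pvStep chunks (chunks.length : Int)) (parts, (idx : Int))
      = (parts ++ (chunks.drop idx).take c, ((idx + c : Nat) : Int)) := by
  induction c generalizing parts with
  | zero => simp [PySem.List.pyRange_one_eq_nil]
  | succ c ih =>
    have hsr : PySem.List.pyRange 0 ((c : Int) + 1) 1
        = PySem.List.pyRange 0 (c : Int) 1 ++ [(c : Int)] :=
      PySem.List.pyRange_one_succ_right (by exact_mod_cast Nat.zero_le c)
    have hc : ((c : Int) + 1) = (((c + 1 : Nat)) : Int) := by push_cast; ring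
    rw [← hc, hsr, List.foldl_append, ih parts (by omega)]
    have hlt : idx + c < chunks.length := by omega
    simp only [List.foldl_cons, List.foldl_nil, pvStep]
    have : ((idx + c : Nat) : Int) < (chunks.length : Int) := by exact_mod_cast hlt
    rw [if_pos this]
    have hget : PySem.List.pyGetD chunks ((idx + c : Nat) : Int) "" = chunks[idx + c]'hlt := by
      rw [PySem.List.pyGetD_eq_getElem chunks "" (by exact_mod_cast Nat.zero_le (idx + c))
        (by exact_mod_cast hlt)]
      congr 1
    have htake : (chunks.drop idx).take (c + 1)
        = (chunks.drop idx).take c ++ [chunks[idx + c]'hlt] := by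
      rw [List.take_add_one]
      have hcd : c < (chunks.drop idx).length := by simp; omega
      simp [List.getElem?_eq_getElem hcd, List.getElem_drop]
    rw [hget]
    refine Prod.ext ?_ ?_
    · simp [htake]
    · simp; ring

-- one pvGroup call from a known index
lemma pv_group_eq (chunks : List String) (c idx : Nat) (st : List String × Int)
    (hst : st.2 = (idx : Int)) (h : idx + c ≤ chunks.length) (hc : 0 < c) :
    pvGroup chunks (chunks.length : Int) (c : Int) st
      = (st.1 ++ [PySem.Str.join "\n" ((chunks.drop idx).take c)], ((idx + c : Nat) : Int)) := by
  have hne : (chunks.drop idx).take c ≠ [] := by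
    have : ((chunks.drop idx).take c).length = c := by simp; omega
    intro hcon; rw [hcon] at this; simp at this; omega
  simp only [pvGroup, hst, pv_inner_eq chunks c idx [] h]
  simp [hne]

-- folding pvGroup with constant group size c, k times, starting at index idx
lemma pv_fold_groups (chunks : List String) (c idx k : Nat) (acc : List String)
    (h : idx + k * c ≤ chunks.length) (hc : 0 < c) :
    (PySem.List.pyRange 0 (k : Int) 1).foldl
        (fun st _ => pvGroup chunks (chunks.length : Int) (c : Int) st) (acc, (idx : Int))
      = (acc ++ (List.range k).map
            (fun j => PySem.Str.join "\n" ((chunks.drop (idx + j * c)).take c)),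
         ((idx + k * c : Nat) : Int)) := by
  induction k generalizing acc with
  | zero => simp [PySem.List.pyRange_one_eq_nil]
  | succ k ih =>
    have hsr : PySem.List.pyRange 0 ((k : Int) + 1) 1
        = PySem.List.pyRange 0 (k : Int) 1 ++ [(k : Int)] :=
      PySem.List.pyRange_one_succ_right (by exact_mod_cast Nat.zero_le k)
    have hk1 : ((k : Int) + 1) = (((k + 1 : Nat)) : Int) := by push_cast; ring
    rw [← hk1, hsr, List.foldl_append, ih acc (by nlinarith)]
    simp only [List.foldl_cons, List.foldl_nil]
    rw [pv_group_eq chunks c (idx + k * c) _ rfl (by nlinarith) hc]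
    refine Prod.ext ?_ ?_
    · simp [List.range_succ]
    · simp; ring

-- B's loop is the map of the formula over range M (Nat form)
lemma pv_alt_fold (chunks : List String) (q r M : Nat) :
    (PySem.List.pyRange 0 (M : Int) 1).foldl
        (fun acc i =>
          acc ++ [PySem.Str.join "\n" (PySem.List.slice chunks
            (some (i * (q : Int) + min i (r : Int)))
            (some (i * (q : Int) + min i (r : Int) + (q : Int) + (if i < (r : Int) then 1 else 0))))])
        []
      = (List.range M).map (fun i => PySem.Str.join "\n"
          ((chunks.drop (i * q + min i r)).take (q + if i < r then 1 else 0))) := by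
  rw [PySem.List.foldl_append_singleton_eq_map, PySem.List.pyRange_one 0 (M : Int)]
  simp only [List.map_map, Int.sub_zero, Int.toNat_natCast]
  refine List.map_congr_left ?_
  intro i hi
  have hiM : i < M := List.mem_range.mp hi
  have h0 : (0 : Int) + (i : Int) = (i : Int) := by ring
  simp only [Function.comp, h0]
  have hmin : min (i : Int) (r : Int) = ((min i r : Nat) : Int) := by
    rcases Nat.le_total i r with h | h
    · simp [min_eq_left h, min_eq_left (by exact_mod_cast h : (i:Int) ≤ r)]
    · simp [min_eq_right h, min_eq_right (by exact_mod_cast h : (r:Int) ≤ i)]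
  have hif : (if (i : Int) < (r : Int) then (1 : Int) else 0)
      = (((if i < r then 1 else 0) : Nat) : Int) := by
    by_cases h : i < r
    · simp [h, (by exact_mod_cast h : (i : Int) < r)]
    · simp [h, (by exact_mod_cast h : ¬ (i : Int) < r)]
  have hstart : (i : Int) * (q : Int) + min (i : Int) (r : Int) = ((i * q + min i r : Nat) : Int) := by
    rw [hmin]; push_cast; ring
  have hstop : (i : Int) * (q : Int) + min (i : Int) (r : Int) + (q : Int)
        + (if (i : Int) < (r : Int) then (1 : Int) else 0)
      = ((i * q + min i r : Nat) : Int) + (((q + if i < r then 1 else 0) : Nat) : Int) := by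
    rw [hmin, hif]; push_cast; ring
  rw [hstop, hstart, PySem.List.slice_natCast_add]

-- ===== VERDICT (by name: the statement is the Claim_ definition above) =====
theorem limit_chunks_to_max_spec : Claim_equal_limit_chunks_to_max := by
  intro chunks max_chunks _hdom hpre
  unfold Spec_limit_chunks_to_max limit_chunks_to_max limit_chunks_to_max_alt
  simp only []
  by_cases hle : (chunks.length : Int) ≤ max_chunks
  · simp [hle]
  · rw [if_neg hle, if_neg hle]
    rcases lt_trichotomy max_chunks 0 with hneg | hzero | hpos
    · -- negative max_chunks: every range is empty, both sides return []
      have hr := PySem.Int.mod_neg_bounds (chunks.length : Int) hneg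
      have hfold0 : (PySem.List.pyRange 0 max_chunks 1) = [] :=
        PySem.List.pyRange_one_eq_nil (by omega)
      by_cases h0 : PySem.Int.mod (chunks.length : Int) max_chunks = 0
      · simp [h0, hfold0]
      · rw [if_neg h0]
        have h1 : (PySem.List.pyRange 0 (PySem.Int.mod (chunks.length : Int) max_chunks) 1) = [] :=
          PySem.List.pyRange_one_eq_nil (by omega)
        have h2 : (PySem.List.pyRange 0
            (max_chunks - PySem.Int.mod (chunks.length : Int) max_chunks) 1) = [] :=
          PySem.List.pyRange_one_eq_nil (by omega)
        simp [h1, h2, hfold0]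
    · -- max_chunks = 0: Pre_ forces chunks = [], contradicting ¬(len ≤ 0)
      exfalso
      rcases hpre with hnil | hne
      · subst hnil; simp at hle; omega
      · exact hne hzero
    · -- the real case: 0 < max_chunks < len chunks
      set M : Nat := max_chunks.toNat with hMdef
      have hMcast : max_chunks = (M : Int) := by omega
      have hM : 0 < M := by omega
      set n : Nat := chunks.length with hndef
      have hMn : M < n := by omega
      rw [hMcast]
      have hq := PySem.Int.floordiv_natCast n M
      have hr := PySem.Int.mod_natCast n M
      rw [hq, hr]
      set q : Nat := n / M with hqdef
      set r : Nat := n % M with hrdef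
      have hrM : r < M := Nat.mod_lt _ hM
      have hq1 : 1 ≤ q := Nat.one_le_div_iff hM |>.mpr (le_of_lt hMn)
      have hnqr : M * q + r = n := Nat.div_add_mod n M
      rw [pv_alt_fold chunks q r M]
      by_cases hr0 : ((r : Nat) : Int) = 0
      · -- divisible branch
        have hr0' : r = 0 := by exact_mod_cast hr0
        rw [if_pos hr0]
        have hfold := pv_fold_groups chunks q 0 M [] (by omega) hq1
        simp only [Nat.zero_add, Nat.cast_zero] at hfold
        rw [← hndef] at hfold
        rw [hfold]
        simp only [List.nil_append]
        refine List.map_congr_left ?_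
        intro i hi
        simp [hr0']
      · -- non-divisible branch
        have hr1 : 0 < r := by omega
        rw [if_neg hr0]
        have hq1' : ((q : Int) + 1) = ((q + 1 : Nat) : Int) := by push_cast; ring
        have hfold1 := pv_fold_groups chunks (q + 1) 0 r [] (by nlinarith) (by omega)
        simp only [Nat.zero_add, Nat.cast_zero] at hfold1
        rw [List.nil_append] at hfold1
        rw [← hndef] at hfold1
        rw [hq1', hfold1]
        have hMr : ((M : Int) - (r : Int)) = ((M - r : Nat) : Int) := by
          push_cast [Nat.cast_sub (le_of_lt hrM)]; ring
        have hfold2 := pv_fold_groups chunks q (r * (q + 1)) (M - r)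
          ((List.range r).map
            (fun j => PySem.Str.join "\n" ((chunks.drop (j * (q + 1))).take (q + 1))))
          (by nlinarith [Nat.sub_add_cancel (le_of_lt hrM)]) hq1
        rw [← hndef] at hfold2
        rw [hMr, hfold2]
        dsimp only
        have hranges : List.range M = List.range r ++ (List.range (M - r)).map (fun x => r + x) := by
          conv_lhs => rw [show M = r + (M - r) by omega]
          exact List.range_add
        rw [hranges, List.map_append, List.map_map]
        congr 1
        · refine List.map_congr_left ?_
          intro i hi
          have hir : i < r := List.mem_range.mp hi
          have h1 : i * q + min i r = i * (q + 1) := by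
            rw [min_eq_left (le_of_lt hir)]; ring
          simp [hir, h1]
        · refine List.map_congr_left ?_
          intro j _
          have h1 : ¬ (r + j) < r := by omega
          have h2 : r * (q + 1) + j * q = (r + j) * q + r := by ring
          simp [Function.comp, h1, h2]
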